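-- pv_equiv track=rewrite | github.com/aaqureshi3/My-First-Program | assign1.py | make_position_string
-- ===== SOURCE A (Python) =====
-- def make_position_string(length):
--     """
--     Takes the length of the state and returns a string 01234... to be
--     displayed in the interaction to make it easier for the user to pick
--     the position of the pair to be moved.
--
--     make_position_string(int) -> string
--     """
--     string = ""
--     for i in range(0,length):
--        if i < 10:
--            string = string + str(i)
--        else:
--            string = string + str(i)[-1]
--     return string
-- ===== SOURCE B (Python) =====
-- def make_position_string(length):
--     """
--     Takes the length of the state and returns a string 01234... to be
--     displayed in the interaction to make it easier for the user to pick
--     the position of the pair to be moved.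
--
--     make_position_string(int) -> string
--     """
--     return ('0123456789' * (length // 10 + 1))[:length]
-- ===== Notes on version B (the rewrite author's own statement) =====
-- stated objective: faster
-- what changed: Replaces the per-index loop (which appends str(i) or its last digit character by character) by repeating the constant pattern of the ten digits enough times and truncating to the requested length.
import Mathlib
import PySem

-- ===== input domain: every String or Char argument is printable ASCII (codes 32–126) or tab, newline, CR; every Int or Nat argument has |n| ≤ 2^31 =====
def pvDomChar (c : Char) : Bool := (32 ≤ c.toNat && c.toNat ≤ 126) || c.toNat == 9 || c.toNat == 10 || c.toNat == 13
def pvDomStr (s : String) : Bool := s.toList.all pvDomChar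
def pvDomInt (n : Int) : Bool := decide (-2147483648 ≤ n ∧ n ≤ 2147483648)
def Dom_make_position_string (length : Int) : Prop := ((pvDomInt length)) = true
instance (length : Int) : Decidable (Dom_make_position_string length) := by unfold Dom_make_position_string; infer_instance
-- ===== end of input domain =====

-- B replaces A's per-index loop by repeating '0123456789' and truncating: simpler, no branch per character.

-- ===== PORT A =====
-- character-by-character accumulation over range(0, length); str(i)[-1] ported via
-- PySem.Str.pyGet? (none = IndexError, unreachable: str(i) is never empty)
def make_position_string (length : Int) : String :=
  (PySem.List.pyRange 0 length 1).foldl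
    (fun string i =>
      if i < 10 then string ++ PySem.Int.toStr i
      else
        match PySem.Str.pyGet? (PySem.Int.toStr i) (-1) with
        | some c => string ++ String.ofList [c]
        | none => string)
    ""

-- ===== PORT B =====
-- '0123456789' * (length // 10 + 1), then slice [:length] (string repetition on the char list)
def make_position_string_alt (length : Int) : String :=
  String.ofList
    (PySem.List.slice
      (PySem.List.pyRepeat "0123456789".toList (PySem.Int.floordiv length 10 + 1))
      none (some length))

-- ===== PRECONDITION & SPEC =====
def Spec_make_position_string (length : Int) (out : String) : Prop := out = make_position_string_alt length
instance (length : Int) (out : String) : Decidable (Spec_make_position_string length out) := by unfold Spec_make_position_string; infer_instance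

-- ===== CLAIM (what is proved, stated in full; the proofs are below) =====
def Claim_equal_make_position_string : Prop := ∀ (length : Int), Dom_make_position_string length → Spec_make_position_string length (make_position_string length)

-- ===== LEMMAS AND PROOFS =====

-- the digit character emitted at index i
def pvDigitAt (i : Nat) : Char := Nat.digitChar (i % 10)

-- accumulator of Nat.toDigitsCore is a pure suffix
theorem pv_toDigitsCore_acc (f : Nat) : ∀ (n : Nat) (l : List Char),
    Nat.toDigitsCore 10 f n l = Nat.toDigitsCore 10 f n [] ++ l := by
  induction f with
  | zero => intro n l; simp [Nat.toDigitsCore]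
  | succ f ih =>
    intro n l
    simp only [Nat.toDigitsCore]
    by_cases h : n / 10 = 0
    · simp [h]
    · simp only [h]
      rw [ih (n / 10) ((n % 10).digitChar :: l), ih (n / 10) [(n % 10).digitChar]]
      simp

-- last character of str(n) (n : Nat) is the digit of n % 10
theorem pv_toDigits_last (m : Nat) :
    (Nat.toDigits 10 m).getLast? = some (Nat.digitChar (m % 10)) := by
  show (Nat.toDigitsCore 10 (m + 1) m []).getLast? = _
  simp only [Nat.toDigitsCore]
  by_cases h : m / 10 = 0
  · simp [h]
  · simp only [h]
    rw [pv_toDigitsCore_acc m (m / 10) [(m % 10).digitChar]]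
    simp

theorem pv_toChars_nat (m : Nat) :
    PySem.Int.toChars (m : Int) = Nat.toDigits 10 m := by
  simp [PySem.Int.toChars]

-- the repeated pattern is the digit-cycle prefix of length 10*k
theorem pv_pyRepeat_eq (k : Nat) :
    PySem.List.pyRepeat "0123456789".toList (k : Int)
      = (List.range (10 * k)).map pvDigitAt := by
  induction k with
  | zero => simp [PySem.List.pyRepeat]
  | succ k ih =>
    have h1 : PySem.List.pyRepeat "0123456789".toList ((k + 1 : Nat) : Int)
        = "0123456789".toList ++ PySem.List.pyRepeat "0123456789".toList (k : Int) := by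
      simp [PySem.List.pyRepeat, List.replicate_succ]
    rw [h1, ih]
    have h2 : 10 * (k + 1) = 10 + 10 * k := by ring
    rw [h2, List.range_add]
    have h3 : (List.map (fun x => 10 + x) (List.range (10 * k))).map pvDigitAt
        = (List.range (10 * k)).map pvDigitAt := by
      rw [List.map_map]
      apply List.map_congr_left
      intro a _
      simp [Function.comp, pvDigitAt, Nat.add_mod_left]
    rw [List.map_append, h3]
    rfl

-- one loop step of A appends exactly pvDigitAt i
theorem pv_stepA (m : Nat) (s : String) :
    (if (m : Int) < 10 then s ++ PySem.Int.toStr (m : Int)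
     else
       match PySem.Str.pyGet? (PySem.Int.toStr (m : Int)) (-1) with
       | some c => s ++ String.ofList [c]
       | none => s).toList = s.toList ++ [pvDigitAt m] := by
  by_cases h : m < 10
  · have h' : (m : Int) < 10 := by exact_mod_cast h
    rw [if_pos h']
    have hd : Nat.toDigits 10 m = [Nat.digitChar (m % 10)] := by
      show Nat.toDigitsCore 10 (m + 1) m [] = _
      simp only [Nat.toDigitsCore]
      rw [if_pos (Nat.div_eq_of_lt h)]
    simp [PySem.Int.toStr, pv_toChars_nat, hd, pvDigitAt]
  · have h' : ¬ ((m : Int) < 10) := by exact_mod_cast h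
    rw [if_neg h']
    have hget : PySem.Str.pyGet? (PySem.Int.toStr (m : Int)) (-1)
        = some (Nat.digitChar (m % 10)) := by
      simp only [PySem.Str.pyGet?_eq, PySem.Chars.pyGet?_eq_listPyGet?]
      rw [PySem.List.pyGet?_neg_one]
      simp only [PySem.Int.toStr, String.toList_ofList]
      rw [pv_toChars_nat, pv_toDigits_last]
    rw [hget]
    simp [pvDigitAt]

-- A on a natural length is the digit cycle of that length
theorem pv_A_nat (m : Nat) :
    (make_position_string (m : Int)).toList = (List.range m).map pvDigitAt := by
  induction m with
  | zero => simp [make_position_string, PySem.List.pyRange]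
  | succ m ih =>
    unfold make_position_string at ih ⊢
    have hr : PySem.List.pyRange 0 ((m + 1 : Nat) : Int) 1
        = PySem.List.pyRange 0 (m : Int) 1 ++ [(m : Int)] := by
      have := PySem.List.pyRange_one_succ_right (a := 0) (b := (m : Int)) (by exact_mod_cast Nat.zero_le m)
      rw [← this]; norm_cast
    rw [hr, List.foldl_append]
    simp only [List.foldl_cons, List.foldl_nil]
    rw [pv_stepA m _, ih, List.range_succ, List.map_append]
    rfl

-- B on a natural length is the same digit cycle
theorem pv_B_nat (m : Nat) :
    (make_position_string_alt (m : Int)).toList = (List.range m).map pvDigitAt := by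
  unfold make_position_string_alt
  have hfd : PySem.Int.floordiv (m : Int) 10 + 1 = ((m / 10 + 1 : Nat) : Int) := by
    rw [show (10:Int) = ((10:Nat):Int) from rfl, PySem.Int.floordiv_natCast]
    push_cast; ring
  rw [String.toList_ofList, hfd, pv_pyRepeat_eq (m / 10 + 1),
    PySem.List.slice_to_natCast, ← List.map_take, List.take_range]
  have : min m (10 * (m / 10 + 1)) = m := by omega
  rw [this]

theorem pv_A_neg (length : Int) (h : length < 0) : make_position_string length = "" := by
  unfold make_position_string
  have : PySem.List.pyRange 0 length 1 = [] := by
    simp [PySem.List.pyRange]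
    omega
  rw [this]; rfl

theorem pv_B_neg (length : Int) (h : length < 0) : make_position_string_alt length = "" := by
  unfold make_position_string_alt
  have hk : (PySem.Int.floordiv length 10 + 1).toNat = 0 := by
    have := PySem.Int.floordiv_lt_iff_lt_mul (a := length) (b := 10) (q := 0) (by omega)
    omega
  unfold PySem.List.pyRepeat
  rw [hk]
  simp [PySem.List.slice]

-- ===== VERDICT (by name: the statement is the Claim_ definition above) =====
theorem make_position_string_spec : Claim_equal_make_position_string := by
  intro length _
  unfold Spec_make_position_string
  rcases le_or_gt 0 length with h | h
  · have hcast : length = ((length.toNat : Nat) : Int) := by omega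
    rw [hcast]
    apply String.toList_inj.mp
    rw [pv_A_nat, pv_B_nat]
  · rw [pv_A_neg length (by omega), pv_B_neg length (by omega)]
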